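-- pv_equiv track=rewrite | github.com/nativ3ai/h3retik | scripts/security_pipeline.py | adapt_text_for_kali
-- ===== SOURCE A (Python) =====
-- def adapt_text_for_kali(value: str) -> str:
--     rewrites = [
--         ("http://127.0.0.1", "http://host.docker.internal"),
--         ("https://127.0.0.1", "https://host.docker.internal"),
--         ("http://localhost", "http://host.docker.internal"),
--         ("https://localhost", "https://host.docker.internal"),
--         ("ssh://127.0.0.1", "ssh://host.docker.internal"),
--         ("ssh://localhost", "ssh://host.docker.internal"),
--         ("artifacts/", "/artifacts/"),
--     ]
--     out = value
--     for old, new in rewrites: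
--         out = out.replace(old, new)
--     if out == "127.0.0.1" or out == "localhost":
--         return "host.docker.internal"
--     return out
-- ===== SOURCE B (Python) =====
-- # Single left-to-right scan replacing at the first matching rewrite, instead of
-- # seven full-string .replace passes; same final localhost guard.
-- _REWRITES = [
--     ("http://127.0.0.1", "http://host.docker.internal"),
--     ("https://127.0.0.1", "https://host.docker.internal"),
--     ("http://localhost", "http://host.docker.internal"),
--     ("https://localhost", "https://host.docker.internal"),
--     ("ssh://127.0.0.1", "ssh://host.docker.internal"),
--     ("ssh://localhost", "ssh://host.docker.internal"),
--     ("artifacts/", "/artifacts/"),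
-- ]
--
--
-- def adapt_text_for_kali(value: str) -> str:
--     pieces = []
--     i = 0
--     n = len(value)
--     while i < n:
--         for old, new in _REWRITES:
--             if value.startswith(old, i):
--                 pieces.append(new)
--                 i += len(old)
--                 break
--         else:
--             pieces.append(value[i])
--             i += 1
--     out = "".join(pieces)
--     if out == "127.0.0.1" or out == "localhost":
--         return "host.docker.internal"
--     return out
-- ===== Notes on version B (the rewrite author's own statement) =====
-- stated objective: alternative
-- what changed: Replaces the seven sequential full-string .replace passes by one table-driven left-to-right scan that, at each position, substitutes the first matching rewrite or copies one character, so the string is traversed a single time.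
import Mathlib
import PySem

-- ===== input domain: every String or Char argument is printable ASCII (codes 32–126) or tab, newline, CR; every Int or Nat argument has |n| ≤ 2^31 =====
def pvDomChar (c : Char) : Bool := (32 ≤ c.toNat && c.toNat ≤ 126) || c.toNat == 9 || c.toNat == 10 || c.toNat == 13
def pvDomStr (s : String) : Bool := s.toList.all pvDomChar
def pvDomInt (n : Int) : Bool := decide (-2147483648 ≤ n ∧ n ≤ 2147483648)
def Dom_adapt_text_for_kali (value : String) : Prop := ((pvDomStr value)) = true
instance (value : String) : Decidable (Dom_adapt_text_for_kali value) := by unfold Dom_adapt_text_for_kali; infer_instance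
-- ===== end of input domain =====

-- B replaces the seven sequential full-string .replace passes by ONE table-driven
-- left-to-right scan (try each rewrite at the current position, substitute or copy
-- one character); equal return value is proved for every input.

-- ===== PORT A =====
def adapt_text_for_kali (value : String) : String :=
  let rewrites : List (String × String) :=
    [("http://127.0.0.1", "http://host.docker.internal"),
     ("https://127.0.0.1", "https://host.docker.internal"),
     ("http://localhost", "http://host.docker.internal"),
     ("https://localhost", "https://host.docker.internal"),
     ("ssh://127.0.0.1", "ssh://host.docker.internal"),
     ("ssh://localhost", "ssh://host.docker.internal"),
     ("artifacts/", "/artifacts/")]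
  let out := rewrites.foldl (fun out pr => PySem.Str.replace out pr.1 pr.2) value
  if out == "127.0.0.1" || out == "localhost" then "host.docker.internal" else out

-- ===== PORT B =====
-- the rewrite table of Source B, on code points
def kaliRewrites : List (List Char × List Char) :=
  [("http://127.0.0.1".toList, "http://host.docker.internal".toList),
   ("https://127.0.0.1".toList, "https://host.docker.internal".toList),
   ("http://localhost".toList, "http://host.docker.internal".toList),
   ("https://localhost".toList, "https://host.docker.internal".toList),
   ("ssh://127.0.0.1".toList, "ssh://host.docker.internal".toList),
   ("ssh://localhost".toList, "ssh://host.docker.internal".toList),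
   ("artifacts/".toList, "/artifacts/".toList)]

-- Source B's inner `for old, new in _REWRITES: if value.startswith(old, i)` loop
def firstRewrite (tbl : List (List Char × List Char)) (s : List Char) :
    Option (List Char × List Char) :=
  match tbl with
  | [] => none
  | qr :: rest => if qr.1.isPrefixOf s then some qr else firstRewrite rest s

-- Source B's outer `while i < n` loop: substitute the first matching rewrite or copy one char
def kaliScan (tbl : List (List Char × List Char)) : List Char → List Char
  | [] => []
  | c :: t =>
    match firstRewrite tbl (c :: t) with
    | some qr => qr.2 ++ kaliScan tbl (t.drop (qr.1.length - 1))
    | none => c :: kaliScan tbl t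
  termination_by s => s.length
  decreasing_by all_goals (simp only [List.length_drop, List.length_cons]; omega)

def adapt_text_for_kali_alt (value : String) : String :=
  let out := String.ofList (kaliScan kaliRewrites value.toList)
  if out == "127.0.0.1" || out == "localhost" then "host.docker.internal" else out

-- ===== PRECONDITION & SPEC =====
def Spec_adapt_text_for_kali (value : String) (out : String) : Prop := out = adapt_text_for_kali_alt value
instance (value : String) (out : String) : Decidable (Spec_adapt_text_for_kali value out) := by unfold Spec_adapt_text_for_kali; infer_instance

-- ===== CLAIM (what is proved, stated in full; the proofs are below) =====
def Claim_equal_adapt_text_for_kali : Prop := ∀ (value : String), Dom_adapt_text_for_kali value → Spec_adapt_text_for_kali value (adapt_text_for_kali value)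

-- ===== LEMMAS AND PROOFS =====

-- step equations of kaliScan (well-founded defs do not reduce definitionally)
lemma kaliScan_nil (tbl : List (List Char × List Char)) : kaliScan tbl [] = [] := by
  rw [kaliScan]

lemma kaliScan_cons_some (tbl : List (List Char × List Char)) (c : Char) (t : List Char)
    (qr : List Char × List Char) (h : firstRewrite tbl (c :: t) = some qr) :
    kaliScan tbl (c :: t) = qr.2 ++ kaliScan tbl (t.drop (qr.1.length - 1)) := by
  rw [kaliScan, h]

lemma kaliScan_cons_none (tbl : List (List Char × List Char)) (c : Char) (t : List Char)
    (h : firstRewrite tbl (c :: t) = none) :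
    kaliScan tbl (c :: t) = c :: kaliScan tbl t := by
  rw [kaliScan, h]

-- `pvMism a b`: a and b provably disagree at some position inside their common range
def pvMism : List Char → List Char → Bool
  | x :: a, y :: b => (x != y) || pvMism a b
  | _, _ => false

lemma pvMism_comm (a b : List Char) : pvMism a b = pvMism b a := by
  induction a generalizing b with
  | nil => cases b <;> simp [pvMism]
  | cons x a ih =>
    cases b with
    | nil => simp [pvMism]
    | cons y b =>
      have hb : (x != y) = (y != x) := by
        apply Bool.eq_iff_iff.mpr
        simp only [bne_iff_ne]
        exact ne_comm
      rw [pvMism, pvMism, ih, hb]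

lemma pvMism_no_prefix (a b Y : List Char) (h : pvMism a b = true) : ¬ b <+: a ++ Y := by
  induction a generalizing b with
  | nil => simp [pvMism] at h
  | cons x a ih =>
    cases b with
    | nil => simp [pvMism] at h
    | cons y b =>
      simp [pvMism] at h
      intro hp
      rw [List.cons_append, List.cons_prefix_cons] at hp
      rcases h with h | h
      · exact h hp.1.symm
      · exact ih b h hp.2

-- single-pattern scanner; equals PySem.Chars.replace for a nonempty pattern
def pvRep (old new : List Char) : List Char → List Char
  | [] => []
  | c :: t =>
    if old.isPrefixOf (c :: t) then new ++ pvRep old new (t.drop (old.length - 1))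
    else c :: pvRep old new t
  termination_by s => s.length
  decreasing_by all_goals (simp only [List.length_drop, List.length_cons]; omega)

lemma pvRep_nil (old new : List Char) : pvRep old new [] = [] := by
  rw [pvRep]

lemma pvRep_cons_pos (old new : List Char) (c : Char) (t : List Char)
    (h : old.isPrefixOf (c :: t)) :
    pvRep old new (c :: t) = new ++ pvRep old new (t.drop (old.length - 1)) := by
  rw [pvRep, if_pos h]

lemma pvRep_cons_neg (old new : List Char) (c : Char) (t : List Char)
    (h : ¬ old.isPrefixOf (c :: t)) :
    pvRep old new (c :: t) = c :: pvRep old new t := by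
  rw [pvRep, if_neg h]

lemma go_spec (old new : List Char) (h : old ≠ []) :
    ∀ (fuel : Nat) (l acc : List Char), l.length ≤ fuel →
      PySem.Chars.replace.go old new fuel l acc = acc.reverse ++ pvRep old new l := by
  intro fuel
  induction fuel with
  | zero =>
    intro l acc hl
    have hnil : l = [] := by cases l <;> simp_all
    subst hnil
    simp [PySem.Chars.replace.go, pvRep_nil]
  | succ fuel ih =>
    intro l acc hl
    cases l with
    | nil => simp [PySem.Chars.replace.go, pvRep_nil]
    | cons c t =>
      obtain ⟨o, old', rfl⟩ : ∃ o old', old = o :: old' := by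
        cases old with
        | nil => exact absurd rfl h
        | cons o old' => exact ⟨o, old', rfl⟩
      by_cases hpre : (o :: old').isPrefixOf (c :: t)
      · have hlen : ((c :: t).drop (o :: old').length).length ≤ fuel := by
          simp at hl ⊢; omega
        rw [PySem.Chars.replace.go, if_pos hpre, ih _ _ hlen]
        simp [pvRep_cons_pos _ _ _ _ hpre]
      · have hlen : t.length ≤ fuel := by simp at hl; omega
        rw [PySem.Chars.replace.go, if_neg hpre, ih _ _ hlen]
        simp [pvRep_cons_neg _ _ _ _ hpre]

lemma replace_eq_pvRep (s old new : List Char) (h : old ≠ []) :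
    PySem.Chars.replace s old new = pvRep old new s := by
  rw [PySem.Chars.replace, if_neg (by simpa using h)]
  simpa using go_spec old new h s.length s [] le_rfl

lemma pvRep_split (p r : List Char) :
    ∀ (n : Nat) (s : List Char), (∀ m < n, ¬ p <+: s.drop m) →
      pvRep p r s = s.take n ++ pvRep p r (s.drop n) := by
  intro n
  induction n with
  | zero => intro s _; simp
  | succ n ih =>
    intro s hs
    cases s with
    | nil => simp [pvRep_nil]
    | cons c t =>
      have h0 : ¬ p <+: (c :: t) := by simpa using hs 0 (by omega)
      have hpre : ¬ p.isPrefixOf (c :: t) := by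
        simpa [List.isPrefixOf_iff_prefix] using h0
      rw [pvRep_cons_neg _ _ _ _ hpre,
        ih t (fun m hm => by simpa using hs (m + 1) (by omega))]
      simp

lemma pvRep_no_new (p r : List Char) :
    ∀ (s q : List Char), ¬ q <+: s → (∀ j < q.length, pvMism (q.drop j) r = true) →
      ¬ q <+: pvRep p r s := by
  intro s
  induction hn : s.length using Nat.strong_induction_on generalizing s with
  | _ n ih =>
    subst hn
    cases s with
    | nil =>
      intro q hq _
      rw [pvRep_nil]
      intro hcon
      exact hq ((List.prefix_nil.mp hcon) ▸ List.nil_prefix)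
    | cons c t =>
      intro q hq H
      by_cases hpre : p.isPrefixOf (c :: t)
      · rw [pvRep_cons_pos _ _ _ _ hpre]
        have h0 : pvMism q r = true := by
          cases q with
          | nil => exact absurd List.nil_prefix hq
          | cons y q' => simpa using H 0 (by simp)
        rw [pvMism_comm] at h0
        exact pvMism_no_prefix r q _ h0
      · rw [pvRep_cons_neg _ _ _ _ hpre]
        cases q with
        | nil => exact fun _ => hq List.nil_prefix
        | cons y q' =>
          intro hcon
          rw [List.cons_prefix_cons] at hcon
          have hq' : ¬ q' <+: t := by
            intro h'
            exact hq (by rw [List.cons_prefix_cons]; exact ⟨hcon.1, h'⟩)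
          exact ih t.length (by simp) t rfl q' hq'
            (fun j hj => by simpa using H (j + 1) (by simpa using hj)) hcon.2

lemma firstRewrite_eq_none_iff (tbl : List (List Char × List Char)) (s : List Char) :
    firstRewrite tbl s = none ↔ ∀ qr ∈ tbl, ¬ qr.1 <+: s := by
  induction tbl with
  | nil => simp [firstRewrite]
  | cons qr rest ih =>
    rw [firstRewrite]
    by_cases h : qr.1.isPrefixOf s
    · rw [if_pos h]
      constructor
      · intro hc; cases hc
      · intro hall
        exact absurd (by simpa [List.isPrefixOf_iff_prefix] using h) (hall qr (by simp))
    · rw [if_neg h, ih]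
      constructor
      · intro hall qr' hqr'
        rcases List.mem_cons.mp hqr' with rfl | hm
        · simpa [List.isPrefixOf_iff_prefix] using h
        · exact hall _ hm
      · intro hall qr' hm
        exact hall _ (by simp [hm])

lemma firstRewrite_some (tbl : List (List Char × List Char)) (s : List Char)
    (qr : List Char × List Char) (h : firstRewrite tbl s = some qr) :
    qr ∈ tbl ∧ qr.1 <+: s := by
  induction tbl with
  | nil => simp [firstRewrite] at h
  | cons qr' rest ih =>
    by_cases hp : qr'.1.isPrefixOf s
    · rw [firstRewrite, if_pos hp] at h
      cases h
      exact ⟨by simp, by simpa [List.isPrefixOf_iff_prefix] using hp⟩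
    · rw [firstRewrite, if_neg hp] at h
      obtain ⟨h1, h2⟩ := ih h
      exact ⟨by simp [h1], h2⟩

lemma firstRewrite_pres (p r : List Char) (tbl : List (List Char × List Char))
    (HA : ∀ qr ∈ tbl, ∀ j < qr.1.length, pvMism (qr.1.drop j) r = true)
    (HB : ∀ qr ∈ tbl, ∀ j, 1 ≤ j → j < qr.1.length → pvMism (qr.1.drop j) p = true)
    (s : List Char) (hps : ¬ p <+: s) :
    firstRewrite tbl (pvRep p r s) = firstRewrite tbl s := by
  induction tbl with
  | nil => rfl
  | cons qr rest ih =>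
    by_cases hq : qr.1.isPrefixOf s
    · have hqs : qr.1 <+: s := by simpa [List.isPrefixOf_iff_prefix] using hq
      obtain ⟨z, hz⟩ := hqs
      have hsplit : pvRep p r s = s.take qr.1.length ++ pvRep p r (s.drop qr.1.length) := by
        apply pvRep_split
        intro m hm
        cases m with
        | zero => simpa using hps
        | succ m =>
          rw [← hz, List.drop_append_of_le_length (by omega)]
          exact pvMism_no_prefix _ _ _ (HB qr (by simp) (m + 1) (by omega) (by omega))
      have htake : s.take qr.1.length = qr.1 := by
        rw [← hz]; simp
      have hpref' : qr.1 <+: pvRep p r s := by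
        rw [hsplit, htake]; exact List.prefix_append _ _
      rw [firstRewrite, firstRewrite, if_pos hq,
        if_pos (by simpa [List.isPrefixOf_iff_prefix] using hpref')]
    · have hqs : ¬ qr.1 <+: s := by simpa [List.isPrefixOf_iff_prefix] using hq
      have hnot : ¬ qr.1 <+: pvRep p r s :=
        pvRep_no_new p r s qr.1 hqs (HA qr (by simp))
      rw [firstRewrite, firstRewrite, if_neg hq,
        if_neg (by simpa [List.isPrefixOf_iff_prefix] using hnot)]
      exact ih (fun q hq => HA q (by simp [hq])) (fun q hq => HB q (by simp [hq]))

lemma kaliScan_append (tbl : List (List Char × List Char)) :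
    ∀ (r0 Y : List Char),
      (∀ qr ∈ tbl, ∀ k < r0.length, pvMism (r0.drop k) qr.1 = true) →
      kaliScan tbl (r0 ++ Y) = r0 ++ kaliScan tbl Y := by
  intro r0
  induction r0 with
  | nil => intro Y _; simp
  | cons c r' ih =>
    intro Y H
    have hnone : firstRewrite tbl (c :: (r' ++ Y)) = none := by
      rw [firstRewrite_eq_none_iff]
      intro qr hqr
      exact pvMism_no_prefix (c :: r') qr.1 Y (by simpa using H qr hqr 0 (by simp))
    rw [List.cons_append, kaliScan_cons_none _ _ _ hnone,
      ih Y (fun qr hqr k hk => by simpa using H qr hqr (k + 1) (by simpa using hk))]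
    rfl

lemma kaliScan_nil_tbl : ∀ s, kaliScan [] s = s := by
  intro s
  induction s with
  | nil => exact kaliScan_nil []
  | cons c t ih => rw [kaliScan_cons_none _ _ _ (by rfl), ih]

lemma kaliChain (p r : List Char) (tbl : List (List Char × List Char))
    (hne : ∀ qr ∈ tbl, qr.1 ≠ [])
    (Hr : ∀ qr ∈ tbl, ∀ k < r.length, pvMism (r.drop k) qr.1 = true)
    (HA : ∀ qr ∈ tbl, ∀ j < qr.1.length, pvMism (qr.1.drop j) r = true)
    (HB : ∀ qr ∈ tbl, ∀ j, 1 ≤ j → j < qr.1.length → pvMism (qr.1.drop j) p = true) :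
    ∀ s, kaliScan ((p, r) :: tbl) s = kaliScan tbl (pvRep p r s) := by
  intro s
  induction hn : s.length using Nat.strong_induction_on generalizing s with
  | _ n ih =>
    subst hn
    cases s with
    | nil => rw [kaliScan_nil, pvRep_nil, kaliScan_nil]
    | cons c t =>
      by_cases hps : p.isPrefixOf (c :: t)
      · -- the head rewrite fires: both sides emit r and continue after the match
        rw [kaliScan_cons_some ((p, r) :: tbl) c t (p, r) (by rw [firstRewrite, if_pos hps]),
          pvRep_cons_pos _ _ _ _ hps, kaliScan_append tbl r _ Hr,
          ih (t.drop (p.length - 1)).length (by simp only [List.length_drop, List.length_cons]; omega) _ rfl]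
      · have hps' : ¬ p <+: (c :: t) := by
          simpa [List.isPrefixOf_iff_prefix] using hps
        have hrep : pvRep p r (c :: t) = c :: pvRep p r t := pvRep_cons_neg _ _ _ _ hps
        have hfm : firstRewrite tbl (c :: pvRep p r t) = firstRewrite tbl (c :: t) := by
          rw [← hrep]; exact firstRewrite_pres p r tbl HA HB (c :: t) hps'
        cases hq : firstRewrite tbl (c :: t) with
        | none =>
          rw [kaliScan_cons_none ((p, r) :: tbl) c t (by rw [firstRewrite, if_neg hps, hq]),
            hrep, kaliScan_cons_none tbl c _ (by rw [hfm, hq]),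
            ih t.length (by simp) t rfl]
        | some qr =>
          obtain ⟨hmem, hpref⟩ := firstRewrite_some tbl (c :: t) qr hq
          obtain ⟨z, hz⟩ := hpref
          have hqne : qr.1 ≠ [] := hne qr hmem
          obtain ⟨y, q', hyq⟩ : ∃ y q', qr.1 = y :: q' := by
            cases hcase : qr.1 with
            | nil => exact absurd hcase hqne
            | cons y q' => exact ⟨y, q', rfl⟩
          have hz' : t = q' ++ z := by
            rw [hyq, List.cons_append] at hz
            injection hz with h1 h2
            exact h2.symm
          -- pvRep does not touch the matched region
          have hsplit : pvRep p r t = t.take (qr.1.length - 1)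
              ++ pvRep p r (t.drop (qr.1.length - 1)) := by
            apply pvRep_split
            intro m hm
            rw [hz', List.drop_append_of_le_length (by rw [hyq] at hm; simp at hm ⊢; omega)]
            have : q'.drop m = qr.1.drop (m + 1) := by rw [hyq]; rfl
            rw [this]
            exact pvMism_no_prefix _ _ _
              (HB qr hmem (m + 1) (by omega) (by rw [hyq] at hm ⊢; simp at hm ⊢; omega))
          have hdrop : (pvRep p r t).drop (qr.1.length - 1)
              = pvRep p r (t.drop (qr.1.length - 1)) := by
            rw [hsplit, List.drop_left' (by
              have hle : qr.1.length ≤ (c :: t).length := List.IsPrefix.length_le ⟨z, hz⟩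
              simp at hle ⊢
              omega)]
          rw [kaliScan_cons_some ((p, r) :: tbl) c t qr (by rw [firstRewrite, if_neg hps, hq]),
            hrep, kaliScan_cons_some tbl c _ qr (by rw [hfm, hq]), hdrop,
            ih (t.drop (qr.1.length - 1)).length (by simp) _ rfl]

-- the seven chain steps, glued
lemma kaliScan_eq_folds (l : List Char) :
    kaliScan kaliRewrites l =
      pvRep "artifacts/".toList "/artifacts/".toList
      (pvRep "ssh://localhost".toList "ssh://host.docker.internal".toList
      (pvRep "ssh://127.0.0.1".toList "ssh://host.docker.internal".toList
      (pvRep "https://localhost".toList "https://host.docker.internal".toList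
      (pvRep "http://localhost".toList "http://host.docker.internal".toList
      (pvRep "https://127.0.0.1".toList "https://host.docker.internal".toList
      (pvRep "http://127.0.0.1".toList "http://host.docker.internal".toList l)))))) := by
  rw [kaliRewrites]
  rw [kaliChain _ _ _ (by decide) (by decide) (by decide) (by decide)]
  rw [kaliChain _ _ _ (by decide) (by decide) (by decide) (by decide)]
  rw [kaliChain _ _ _ (by decide) (by decide) (by decide) (by decide)]
  rw [kaliChain _ _ _ (by decide) (by decide) (by decide) (by decide)]
  rw [kaliChain _ _ _ (by decide) (by decide) (by decide) (by decide)]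
  rw [kaliChain _ _ _ (by decide) (by decide) (by decide) (by decide)]
  rw [kaliChain _ _ _ (by decide) (by decide) (by decide) (by decide)]
  rw [kaliScan_nil_tbl]

-- ===== VERDICT (by name: the statement is the Claim_ definition above) =====
theorem adapt_text_for_kali_spec : Claim_equal_adapt_text_for_kali := by
  intro value _
  unfold Spec_adapt_text_for_kali adapt_text_for_kali adapt_text_for_kali_alt
  have houts :
      PySem.Str.replace (PySem.Str.replace (PySem.Str.replace (PySem.Str.replace
        (PySem.Str.replace (PySem.Str.replace (PySem.Str.replace value
          "http://127.0.0.1" "http://host.docker.internal")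
          "https://127.0.0.1" "https://host.docker.internal")
          "http://localhost" "http://host.docker.internal")
          "https://localhost" "https://host.docker.internal")
          "ssh://127.0.0.1" "ssh://host.docker.internal")
          "ssh://localhost" "ssh://host.docker.internal")
          "artifacts/" "/artifacts/"
      = String.ofList (kaliScan kaliRewrites value.toList) := by
    apply String.toList_inj.mp
    rw [String.toList_ofList, kaliScan_eq_folds]
    simp only [PySem.Str.toList_replace]
    rw [replace_eq_pvRep _ _ _ (by decide), replace_eq_pvRep _ _ _ (by decide),
      replace_eq_pvRep _ _ _ (by decide), replace_eq_pvRep _ _ _ (by decide),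
      replace_eq_pvRep _ _ _ (by decide), replace_eq_pvRep _ _ _ (by decide),
      replace_eq_pvRep _ _ _ (by decide)]
  simp only [List.foldl]
  rw [houts]
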